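-- pv_equiv track=rewrite | github.com/christophergardner-star/Thermodynamic-Continual-Learning-delivered | tar_lab/benchmark_stats.py | _choose_primary_metric
-- ===== SOURCE A (Python) =====
-- from typing import Any, Dict, Iterable, Optional
--
-- PRIMARY_METRIC_PRIORITY = (
--     "accuracy",
--     "top1_accuracy",
--     "node_accuracy",
--     "episodic_return",
--     "f1",
--     "auroc",
--     "shot_noise_robustness",
--     "trainability_gap",
--     "oversmoothing_gap",
--     "effective_dimensionality",
--     "representation_dimensionality",
--     "sample_efficiency",
--     "policy_entropy",
--     "corruption_robustness",
-- )
--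
-- def _choose_primary_metric(metrics: Dict[str, float]) -> Optional[str]:
--     for key in PRIMARY_METRIC_PRIORITY:
--         if key in metrics:
--             return key
--     for key in metrics:
--         if key not in {"seed_variance", "seed_count"}:
--             return key
--     return None
-- ===== SOURCE B (Python) =====
-- from typing import Dict, Optional
--
-- PRIMARY_METRIC_PRIORITY = (
--     "accuracy",
--     "top1_accuracy",
--     "node_accuracy",
--     "episodic_return",
--     "f1",
--     "auroc",
--     "shot_noise_robustness",
--     "trainability_gap",
--     "oversmoothing_gap",
--     "effective_dimensionality",
--     "representation_dimensionality",
--     "sample_efficiency",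
--     "policy_entropy",
--     "corruption_robustness",
-- )
--
-- # rank index built once: priority key -> its position
-- _RANK = {key: i for i, key in enumerate(PRIMARY_METRIC_PRIORITY)}
--
-- def _choose_primary_metric(metrics: Dict[str, float]) -> Optional[str]:
--     # single pass over metrics keeping the minimum rank seen
--     best = None
--     for key in metrics:
--         r = _RANK.get(key)
--         if r is not None and (best is None or r < best):
--             best = r
--     if best is not None:
--         return PRIMARY_METRIC_PRIORITY[best]
--     for key in metrics:
--         if key not in {"seed_variance", "seed_count"}:
--             return key
--     return None
-- ===== Notes on version B (the rewrite author's own statement) =====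
-- stated objective: alternative
-- what changed: B precomputes a rank-index dict from the priority tuple and makes a single pass over metrics keeping the minimum rank, indexing the priority tuple by that rank, instead of A's scan over the 14-entry priority tuple with a membership test into metrics for each; the fallback loop is unchanged.
import Mathlib
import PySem

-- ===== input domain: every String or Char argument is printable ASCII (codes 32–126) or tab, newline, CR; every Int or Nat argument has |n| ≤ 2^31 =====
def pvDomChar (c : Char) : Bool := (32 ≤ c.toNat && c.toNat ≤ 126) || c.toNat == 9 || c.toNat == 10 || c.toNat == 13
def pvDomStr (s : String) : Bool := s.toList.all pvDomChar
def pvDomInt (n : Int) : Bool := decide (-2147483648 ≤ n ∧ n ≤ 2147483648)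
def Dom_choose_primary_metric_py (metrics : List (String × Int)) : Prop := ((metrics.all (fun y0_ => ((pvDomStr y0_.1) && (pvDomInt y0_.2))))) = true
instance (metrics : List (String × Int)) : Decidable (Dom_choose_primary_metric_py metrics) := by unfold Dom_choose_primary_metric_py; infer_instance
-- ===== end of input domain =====

-- B replaces A's scan over the priority tuple (with a membership test into metrics per key)
-- by a rank-index dict and a single minimum-rank pass over metrics; objective: alternative
-- (same cost on this fixed 14-key priority table, genuinely different traversal).

-- ===== PORT A =====
-- PRIMARY_METRIC_PRIORITY (shared module constant)
def priorityList : List String := ["accuracy","top1_accuracy","node_accuracy","episodic_return","f1","auroc","shot_noise_robustness","trainability_gap","oversmoothing_gap","effective_dimensionality","representation_dimensionality","sample_efficiency","policy_entropy","corruption_robustness"]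

-- for key in PRIMARY_METRIC_PRIORITY: if key in metrics: return key  ≡  find? over the tuple;
-- then the fallback loop over metrics, then None.
def choose_primary_metric_py (metrics : List (String × Int)) : Option String :=
  match priorityList.find? (fun k => metrics.any (fun p => p.1 == k)) with
  | some k => some k
  | none =>
    match metrics.find? (fun p => !(p.1 == "seed_variance" || p.1 == "seed_count")) with
    | some p => some p.1
    | none => none

-- ===== PORT B =====
-- _RANK = {key: i for i, key in enumerate(PRIMARY_METRIC_PRIORITY)}
def rankDict : PySem.Dict String Int :=
  (PySem.List.enumerate priorityList 0).foldl (fun d ik => d.insert ik.2 ik.1) PySem.Dict.empty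

-- loop body: r = _RANK.get(key); if r is not None and (best is None or r < best): best = r
def pyMinStep (best : Option Int) (p : String × Int) : Option Int :=
  match rankDict.get? p.1 with
  | none => best
  | some r =>
    match best with
    | none => some r
    | some b => if r < b then some r else some b

-- PRIMARY_METRIC_PRIORITY[best] is in range whenever best is set, so pyGet? returns `some`
-- exactly the Optional[str] the Python returns; then the same fallback loop, then None.
def choose_primary_metric_py_alt (metrics : List (String × Int)) : Option String :=
  match metrics.foldl pyMinStep none with
  | some r => PySem.List.pyGet? priorityList r
  | none =>
    match metrics.find? (fun p => !(p.1 == "seed_variance" || p.1 == "seed_count")) with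
    | some p => some p.1
    | none => none

-- ===== PRECONDITION & SPEC =====
def Spec_choose_primary_metric_py (metrics : List (String × Int)) (out : Option String) : Prop := out = choose_primary_metric_py_alt metrics
instance (metrics : List (String × Int)) (out : Option String) : Decidable (Spec_choose_primary_metric_py metrics out) := by unfold Spec_choose_primary_metric_py; infer_instance

-- ===== CLAIM (what is proved, stated in full; the proofs are below) =====
def Claim_equal_choose_primary_metric_py : Prop := ∀ (metrics : List (String × Int)), Dom_choose_primary_metric_py metrics → Spec_choose_primary_metric_py metrics (choose_primary_metric_py metrics)

-- ===== LEMMAS AND PROOFS =====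

-- first index of k in pl (proof-side characterisation of the rank dict)
def rankOf : List String → String → Option Nat
  | [], _ => none
  | p :: rest, k => if p == k then some 0 else (rankOf rest k).map (· + 1)

theorem get?_rankDict (k : String) : rankDict.get? k = (rankOf priorityList k).map Int.ofNat := by
  rw [show rankDict = PySem.Dict.mk [("accuracy",0),("top1_accuracy",1),("node_accuracy",2),("episodic_return",3),("f1",4),("auroc",5),("shot_noise_robustness",6),("trainability_gap",7),("oversmoothing_gap",8),("effective_dimensionality",9),("representation_dimensionality",10),("sample_efficiency",11),("policy_entropy",12),("corruption_robustness",13)] from by decide]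
  simp only [priorityList, rankOf, PySem.Dict.get?_mk_cons]
  by_cases h0 : ("accuracy" == k) = true
  · obtain rfl : "accuracy" = k := eq_of_beq h0
    decide
  simp only [if_neg h0]
  by_cases h1 : ("top1_accuracy" == k) = true
  · obtain rfl : "top1_accuracy" = k := eq_of_beq h1
    decide
  simp only [if_neg h1]
  by_cases h2 : ("node_accuracy" == k) = true
  · obtain rfl : "node_accuracy" = k := eq_of_beq h2
    decide
  simp only [if_neg h2]
  by_cases h3 : ("episodic_return" == k) = true
  · obtain rfl : "episodic_return" = k := eq_of_beq h3
    decide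
  simp only [if_neg h3]
  by_cases h4 : ("f1" == k) = true
  · obtain rfl : "f1" = k := eq_of_beq h4
    decide
  simp only [if_neg h4]
  by_cases h5 : ("auroc" == k) = true
  · obtain rfl : "auroc" = k := eq_of_beq h5
    decide
  simp only [if_neg h5]
  by_cases h6 : ("shot_noise_robustness" == k) = true
  · obtain rfl : "shot_noise_robustness" = k := eq_of_beq h6
    decide
  simp only [if_neg h6]
  by_cases h7 : ("trainability_gap" == k) = true
  · obtain rfl : "trainability_gap" = k := eq_of_beq h7
    decide
  simp only [if_neg h7]
  by_cases h8 : ("oversmoothing_gap" == k) = true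
  · obtain rfl : "oversmoothing_gap" = k := eq_of_beq h8
    decide
  simp only [if_neg h8]
  by_cases h9 : ("effective_dimensionality" == k) = true
  · obtain rfl : "effective_dimensionality" = k := eq_of_beq h9
    decide
  simp only [if_neg h9]
  by_cases h10 : ("representation_dimensionality" == k) = true
  · obtain rfl : "representation_dimensionality" = k := eq_of_beq h10
    decide
  simp only [if_neg h10]
  by_cases h11 : ("sample_efficiency" == k) = true
  · obtain rfl : "sample_efficiency" = k := eq_of_beq h11
    decide
  simp only [if_neg h11]
  by_cases h12 : ("policy_entropy" == k) = true
  · obtain rfl : "policy_entropy" = k := eq_of_beq h12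
    decide
  simp only [if_neg h12]
  by_cases h13 : ("corruption_robustness" == k) = true
  · obtain rfl : "corruption_robustness" = k := eq_of_beq h13
    decide
  simp only [if_neg h13]
  simp [PySem.Dict.get?]

theorem rankOf_lt_length (pl : List String) (k : String) (n : Nat) (h : rankOf pl k = some n) :
    n < pl.length := by
  induction pl generalizing n with
  | nil => simp [rankOf] at h
  | cons p rest ih =>
    simp only [rankOf] at h
    split at h
    · obtain rfl : 0 = n := Option.some_inj.mp h
      simp
    · obtain ⟨m, hm, rfl⟩ := Option.map_eq_some_iff.mp h
      simpa using Nat.succ_lt_succ (ih m hm)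

-- Nat version of the running-minimum step
def minN (b : Option Nat) (r : Nat) : Option Nat :=
  match b with
  | none => some r
  | some v => if r < v then some r else some v

theorem fold_eq_natfold (metrics : List (String × Int)) (b : Option Nat) :
    metrics.foldl pyMinStep (b.map Int.ofNat) =
      ((metrics.filterMap (fun p => rankOf priorityList p.1)).foldl minN b).map Int.ofNat := by
  induction metrics generalizing b with
  | nil => rfl
  | cons p rest ih =>
    have hstep : pyMinStep (b.map Int.ofNat) p =
        (match rankOf priorityList p.1 with
         | none => b
         | some r => minN b r).map Int.ofNat := by
      simp only [pyMinStep, get?_rankDict]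
      cases hr : rankOf priorityList p.1 with
      | none => rfl
      | some r =>
        cases b with
        | none => rfl
        | some v =>
          by_cases hlt : r < v
          · simp [minN, hlt]
          · simp [minN, hlt]
    cases hr : rankOf priorityList p.1 with
    | none =>
      simp only [List.foldl_cons, List.filterMap_cons, hr, hstep]
      exact ih b
    | some r =>
      simp only [List.foldl_cons, List.filterMap_cons, hr, hstep]
      exact ih (minN b r)

theorem foldl_minN_some (m : List Nat) (a : Nat) : m.foldl minN (some a) = some (m.foldl min a) := by
  induction m generalizing a with
  | nil => rfl
  | cons x xs ih =>
    have : minN (some a) x = some (min a x) := by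
      simp only [minN, Nat.min_def]
      split <;> split <;> simp only [Option.some.injEq] <;> omega
    simp only [List.foldl_cons, this, ih]

theorem foldl_minN_none (m : List Nat) : m.foldl minN none = m.min? := by
  cases m with
  | nil => rfl
  | cons x xs => rw [List.foldl_cons, show minN none x = some x from rfl, foldl_minN_some, List.min?_cons']

theorem foldl_minN_map_succ (m : List Nat) (b : Option Nat) :
    (m.map (· + 1)).foldl minN (b.map (· + 1)) = (m.foldl minN b).map (· + 1) := by
  induction m generalizing b with
  | nil => rfl
  | cons x xs ih =>
    have : minN (b.map (· + 1)) (x + 1) = (minN b x).map (· + 1) := by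
      cases b with
      | none => rfl
      | some v =>
        by_cases h : x < v
        · simp [minN, h]
        · simp [minN, h]
    simp only [List.map_cons, List.foldl_cons, this, ih]

theorem bridge (pl : List String) (metrics : List (String × Int)) :
    pl.find? (fun k => metrics.any (fun p => p.1 == k)) =
      ((metrics.filterMap (fun p => rankOf pl p.1)).foldl minN none).bind (fun n => pl[n]?) := by
  induction pl with
  | nil =>
    have : metrics.filterMap (fun p => rankOf [] p.1) = [] := by
      simp [rankOf]
    simp [this]
  | cons p rest ih =>
    cases hmemb : metrics.any (fun q => q.1 == p) with
    | true =>
      have hfind : List.find? (fun k => metrics.any fun p' => p'.1 == k) (p :: rest) = some p :=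
        List.find?_cons_of_pos hmemb
      rw [hfind]
      obtain ⟨q, hq, hqp⟩ := List.any_eq_true.mp hmemb
      have hq1 : q.1 = p := by simpa using hqp
      have h0mem : (0 : Nat) ∈ metrics.filterMap (fun p' => rankOf (p :: rest) p'.1) := by
        refine List.mem_filterMap.mpr ⟨q, hq, ?_⟩
        simp [rankOf, hq1]
      rw [foldl_minN_none]
      cases hmin : (metrics.filterMap (fun p' => rankOf (p :: rest) p'.1)).min? with
      | none =>
        rw [List.min?_eq_none_iff] at hmin
        rw [hmin] at h0mem
        simp at h0mem
      | some v =>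
        obtain ⟨hv, hle⟩ := List.min?_eq_some_iff.mp hmin
        have : v = 0 := Nat.le_zero.mp (hle 0 h0mem)
        subst this
        simp
    | false =>
      have hall : ∀ q ∈ metrics, (q.1 == p) = false := by
        intro q hq
        simpa using List.any_eq_false.mp hmemb q hq
      have hfm : metrics.filterMap (fun q => rankOf (p :: rest) q.1) =
          (metrics.filterMap (fun q => rankOf rest q.1)).map (· + 1) := by
        rw [List.map_filterMap]
        refine List.filterMap_congr ?_
        intro q hq
        have : (p == q.1) = false := by
          have h' := hall q hq
          simp only [beq_eq_false_iff_ne] at h' ⊢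
          exact fun h => h' h.symm
        simp [rankOf, this]
      have hfind : List.find? (fun k => metrics.any fun p' => p'.1 == k) (p :: rest) =
          List.find? (fun k => metrics.any fun p' => p'.1 == k) rest :=
        List.find?_cons_of_neg (by simp [hmemb])
      rw [hfind, hfm, show (none : Option Nat) = Option.map (· + 1) none from rfl,
        foldl_minN_map_succ, ih]
      cases (metrics.filterMap (fun q => rankOf rest q.1)).foldl minN none with
      | none => rfl
      | some n => simp

-- ===== VERDICT (by name: the statement is the Claim_ definition above) =====
theorem choose_primary_metric_py_spec : Claim_equal_choose_primary_metric_py := by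
  intro metrics _
  unfold Spec_choose_primary_metric_py choose_primary_metric_py choose_primary_metric_py_alt
  rw [show (none : Option Int) = Option.map Int.ofNat none from rfl, fold_eq_natfold, bridge]
  cases hmin : (metrics.filterMap (fun p => rankOf priorityList p.1)).foldl minN none with
  | none => rfl
  | some n =>
    simp only [Option.map_some, Option.bind_some]
    have hlt : n < priorityList.length := by
      rw [foldl_minN_none] at hmin
      obtain ⟨hv, -⟩ := List.min?_eq_some_iff.mp hmin
      obtain ⟨q, -, hq⟩ := List.mem_filterMap.mp hv
      exact rankOf_lt_length _ _ _ hq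
    obtain ⟨s, hs⟩ : ∃ s, priorityList[n]? = some s := ⟨_, List.getElem?_eq_getElem hlt⟩
    rw [show (Int.ofNat n : Int) = ((n : Nat) : Int) from rfl, PySem.List.pyGet?_natCast, hs]
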